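-- pv_equiv track=rewrite | github.com/JAMelendezD/Blender-Math | MathFunc.py | create_faces
-- ===== SOURCE A (Python) =====
-- def create_faces(grid, faces):
--     count = 0
--     for k in range (0, (grid)*(grid-1)):
--         if count < grid-1:
--             A = k
--             B = k+1
--             C = k+(grid)+1
--             D = k+(grid)
--
--             face = (A,B,C,D)
--             faces.append(face)
--
--             count = count + 1
--         else:
--             count = 0
--
--     return(faces)
-- ===== SOURCE B (Python) =====
-- def create_faces(grid, faces):
--     quads = [(i * grid + j, i * grid + j + 1, i * grid + j + grid + 1, i * grid + j + grid)
--              for i in range(grid - 1) for j in range(grid - 1)]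
--     return faces + quads
-- ===== Notes on version B (the rewrite author's own statement) =====
-- stated objective: simpler
-- what changed: Replaced the single flat loop over grid*(grid-1) indices with a skip-counter branch by one nested row/column comprehension computing k = i*grid + j directly and returning faces + quads (a new list; A mutates faces in place), with no branch and no wasted iterations.
import Mathlib
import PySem

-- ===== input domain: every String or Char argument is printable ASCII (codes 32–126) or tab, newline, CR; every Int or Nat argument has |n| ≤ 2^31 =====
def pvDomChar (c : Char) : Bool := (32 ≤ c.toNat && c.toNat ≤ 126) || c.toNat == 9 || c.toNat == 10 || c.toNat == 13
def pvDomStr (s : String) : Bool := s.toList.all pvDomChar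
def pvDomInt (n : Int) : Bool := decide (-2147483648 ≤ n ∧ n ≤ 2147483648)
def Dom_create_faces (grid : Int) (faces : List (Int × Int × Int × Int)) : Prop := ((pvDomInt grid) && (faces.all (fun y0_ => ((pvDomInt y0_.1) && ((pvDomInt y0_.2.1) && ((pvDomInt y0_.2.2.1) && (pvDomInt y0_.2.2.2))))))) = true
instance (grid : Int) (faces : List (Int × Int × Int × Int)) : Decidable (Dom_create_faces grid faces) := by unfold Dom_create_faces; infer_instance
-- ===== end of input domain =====

-- B replaces A's flat loop with a skip-counter branch by one nested row/column comprehension (simpler; same cost).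
-- Python A appends to the `faces` argument in place while B builds a new list; the equivalence proved here is about the return value.

-- ===== PORT A =====
-- the loop body of A: state is (count, faces)
def pvStepA (grid : Int) (st : Int × List (Int × Int × Int × Int)) (k : Int) :
    Int × List (Int × Int × Int × Int) :=
  if st.1 < grid - 1 then (st.1 + 1, st.2 ++ [(k, k + 1, k + grid + 1, k + grid)])
  else (0, st.2)

def create_faces (grid : Int) (faces : List (Int × Int × Int × Int)) : List (Int × Int × Int × Int) :=
  ((PySem.List.pyRange 0 (grid * (grid - 1)) 1).foldl (pvStepA grid) (0, faces)).2

-- ===== PORT B =====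
def create_faces_alt (grid : Int) (faces : List (Int × Int × Int × Int)) : List (Int × Int × Int × Int) :=
  let quads := (PySem.List.pyRange 0 (grid - 1) 1).flatMap (fun i =>
    (PySem.List.pyRange 0 (grid - 1) 1).map (fun j =>
      (i * grid + j, i * grid + j + 1, i * grid + j + grid + 1, i * grid + j + grid)))
  faces ++ quads

-- ===== PRECONDITION & SPEC =====
def Spec_create_faces (grid : Int) (faces : List (Int × Int × Int × Int)) (out : List (Int × Int × Int × Int)) : Prop := out = create_faces_alt grid faces
instance (grid : Int) (faces : List (Int × Int × Int × Int)) (out : List (Int × Int × Int × Int)) : Decidable (Spec_create_faces grid faces out) := by unfold Spec_create_faces; infer_instance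

-- ===== CLAIM (what is proved, stated in full; the proofs are below) =====
def Claim_equal_create_faces : Prop := ∀ (grid : Int) (faces : List (Int × Int × Int × Int)), Dom_create_faces grid faces → Spec_create_faces grid faces (create_faces grid faces)

-- ===== LEMMAS AND PROOFS =====

-- when grid ≤ 1 the branch is never taken and A's fold is the identity on any list of indices
lemma pvA_noemit (g : Int) (hg : g ≤ 1) (l : List Int) (fs : List (Int × Int × Int × Int)) :
    l.foldl (pvStepA g) (0, fs) = (0, fs) := by
  induction l with
  | nil => rfl
  | cons x xs ih =>
      simp only [List.foldl_cons, pvStepA]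
      rw [if_neg (by omega)]
      exact ih

-- folding "append a chunk" over a list is appending the flattened chunks
lemma pvFoldl_app {α : Type} (f : Int → List α) (l : List Int) (fs : List α) :
    l.foldl (fun acc j => acc ++ f j) fs = fs ++ l.flatMap f := by
  induction l generalizing fs with
  | nil => simp
  | cons x xs ih => simp [ih]

-- one block of A's loop: starting with count c and m'+1 iterations left where c + (m'+1) = grid,
-- A emits m' faces then resets the counter
lemma pvBlockAux (g c : Int) (m' : Nat) (hc : 0 ≤ c) (h : c + (m' + 1) = g)
    (base : Int) (fs : List (Int × Int × Int × Int)) :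
    (PySem.List.pyRange base (base + (m' + 1 : Nat)) 1).foldl (pvStepA g) (c, fs)
      = (0, fs ++ (List.range m').map
          (fun (j : Nat) => (base + (j : Int), base + (j : Int) + 1,
            base + (j : Int) + g + 1, base + (j : Int) + g))) := by
  induction m' generalizing c base fs with
  | zero =>
      rw [show base + ((0 + 1 : Nat) : Int) = base + 1 by push_cast; ring,
        PySem.List.pyRange_one_singleton]
      simp only [List.foldl_cons, List.foldl_nil, pvStepA]
      rw [if_neg (by omega)]
      simp
  | succ m ih =>
      rw [PySem.List.pyRange_one_cons (by push_cast; omega)]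
      simp only [List.foldl_cons, pvStepA]
      rw [if_pos (by push_cast at h ⊢; omega)]
      have harg : base + ((m + 1 + 1 : Nat) : Int) = (base + 1) + ((m + 1 : Nat) : Int) := by
        push_cast; ring
      rw [harg, ih (c + 1) (by omega) (by push_cast at h ⊢; omega) (base + 1)
        (fs ++ [(base, base + 1, base + g + 1, base + g)])]
      rw [List.range_succ_eq_map, List.map_cons, List.map_map]
      simp only [List.append_assoc, List.singleton_append, Nat.cast_zero, add_zero]
      congr 3
      apply List.map_congr_left
      intro j _
      simp only [Function.comp_apply, Nat.succ_eq_add_one]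
      push_cast; ring_nf

-- n rows of A's loop equal n iterations of B's outer loop
lemma pvRows (g : Int) (hg : 2 ≤ g) (n : Nat) (fs : List (Int × Int × Int × Int)) :
    (PySem.List.pyRange 0 (g * n) 1).foldl (pvStepA g) (0, fs)
      = (0, (PySem.List.pyRange 0 (n : Int) 1).foldl
          (fun acc i => acc ++ (PySem.List.pyRange 0 (g - 1) 1).map
            (fun j => (i * g + j, i * g + j + 1, i * g + j + g + 1, i * g + j + g))) fs) := by
  induction n generalizing fs with
  | zero =>
      rw [show ((0 : Nat) : Int) = (0 : Int) by norm_num, mul_zero,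
        PySem.List.pyRange_one_eq_nil le_rfl]
      rfl
  | succ n ih =>
      have h1 : (0 : Int) ≤ g * n := by positivity
      have h2 : g * (n : Int) ≤ g * ((n : Nat) + 1 : Nat) := by push_cast; nlinarith
      rw [PySem.List.pyRange_one_append 0 (g * n) (g * ((n : Nat) + 1 : Nat)) h1 h2,
        List.foldl_append, ih]
      have hg1 : (((g - 1).toNat : Nat) : Int) = g - 1 := Int.toNat_of_nonneg (by omega)
      have hb : g * ((n : Nat) + 1 : Nat) = g * n + (((g - 1).toNat + 1 : Nat) : Int) := by
        push_cast [hg1]; ring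
      rw [hb, pvBlockAux g 0 (g - 1).toNat le_rfl (by push_cast [hg1]; ring)]
      rw [show ((n + 1 : Nat) : Int) = (n : Int) + 1 by push_cast; ring,
        PySem.List.pyRange_one_succ_right (by positivity), List.foldl_append]
      simp only [List.foldl_cons, List.foldl_nil]
      congr 2
      rw [PySem.List.pyRange_one, sub_zero, List.map_map]
      apply List.map_congr_left
      intro j _
      simp only [Function.comp_apply, zero_add, Prod.mk.injEq]
      refine ⟨by ring, by ring, by ring, by ring⟩

-- rewrite B's port into the outer-fold-of-appends form
lemma pvAlt_eq (g : Int) (fs : List (Int × Int × Int × Int)) :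
    create_faces_alt g fs
      = (PySem.List.pyRange 0 (g - 1) 1).foldl
          (fun acc i => acc ++ (PySem.List.pyRange 0 (g - 1) 1).map
            (fun j => (i * g + j, i * g + j + 1, i * g + j + g + 1, i * g + j + g))) fs := by
  unfold create_faces_alt
  rw [pvFoldl_app]

-- ===== VERDICT (by name: the statement is the Claim_ definition above) =====
theorem create_faces_spec : Claim_equal_create_faces := by
  intro g fs _
  show create_faces g fs = create_faces_alt g fs
  by_cases hg : g ≤ 1
  · unfold create_faces
    rw [pvA_noemit g hg]
    unfold create_faces_alt
    rw [PySem.List.pyRange_one_eq_nil (by omega)]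
    simp
  · have hg2 : 2 ≤ g := by omega
    rw [pvAlt_eq]
    unfold create_faces
    have hn : g * (g - 1) = g * (((g - 1).toNat : Nat) : Int) := by
      rw [Int.toNat_of_nonneg (by omega : (0 : Int) ≤ g - 1)]
    rw [hn, pvRows g hg2 (g - 1).toNat,
      show (((g - 1).toNat : Nat) : Int) = g - 1 from Int.toNat_of_nonneg (by omega)]
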